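-- pv_equiv track=rewrite | github.com/dishant-3/Python_Practice_2026 | rotatedby2_string.py | isRotated
-- ===== SOURCE A (Python) =====
-- def isRotated(s1,s2):
--         n = len(s1)
--         right_rotated=[0]*n
--         for i in range(n):
--             new_idx = (i+2)%n
--             right_rotated[new_idx] = s1[i]
--
--         left_rotated=[0]*n
--         for j in range(n):
--             new_idx =(j-2+n)%n
--             left_rotated[new_idx] = s1[j]
--
--         right_str = "".join(right_rotated)
--         left_str = "".join(left_rotated)
--
--         if s2 == right_str or s2 ==left_str:
--             return True
--         else:
--             return False
-- ===== SOURCE B (Python) =====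
-- def isRotated(s1, s2):
--     right = s1[-2:] + s1[:-2]
--     left = s1[2:] + s1[:2]
--     return s2 == right or s2 == left
-- ===== Notes on version B (the rewrite author's own statement) =====
-- stated objective: idiomatic
-- what changed: Replaces the two index-remapping loops that place each character at (i±2)%n in a preallocated list (then join) by computing both rotations in closed form with slice concatenation s1[-2:]+s1[:-2] and s1[2:]+s1[:2]; same O(n) asymptotics, large constant-factor win from C-level slicing.
import Mathlib
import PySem

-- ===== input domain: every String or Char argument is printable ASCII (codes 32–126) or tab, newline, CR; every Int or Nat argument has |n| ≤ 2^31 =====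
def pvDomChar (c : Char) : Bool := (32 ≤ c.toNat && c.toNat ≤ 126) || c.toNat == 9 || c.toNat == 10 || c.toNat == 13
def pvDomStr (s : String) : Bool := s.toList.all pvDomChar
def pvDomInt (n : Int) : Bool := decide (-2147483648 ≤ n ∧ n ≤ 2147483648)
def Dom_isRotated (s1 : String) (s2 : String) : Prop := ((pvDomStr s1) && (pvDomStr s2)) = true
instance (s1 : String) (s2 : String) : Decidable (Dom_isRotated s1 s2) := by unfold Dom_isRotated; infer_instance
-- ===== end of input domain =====

-- B computes the two rotations by slice concatenation instead of A's index-remapping loops; return values only, A is total.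

-- ===== PORT A =====
-- Python's [0]*n holds int placeholders; every slot is overwritten before "".join (the index map
-- is a bijection on range(n)), so a Char placeholder list is exact.  "".join of a list of
-- single characters is the string of those characters, and Python string equality is equality
-- of the character lists, so the comparison is ported on List Char.
def isRotated (s1 : String) (s2 : String) : Bool :=
  let cs := s1.toList
  let n : Int := (cs.length : Int)
  let right_rotated :=
    (PySem.List.pyRange 0 n 1).foldl
      (fun acc i =>
        let newIdx := PySem.Int.mod (i + 2) n
        PySem.List.pySetD acc newIdx (PySem.List.pyGetD cs i 'a'))
      (List.replicate cs.length 'a')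
  let left_rotated :=
    (PySem.List.pyRange 0 n 1).foldl
      (fun acc j =>
        let newIdx := PySem.Int.mod (j - 2 + n) n
        PySem.List.pySetD acc newIdx (PySem.List.pyGetD cs j 'a'))
      (List.replicate cs.length 'a')
  if s2.toList = right_rotated ∨ s2.toList = left_rotated then true else false

-- ===== PORT B =====
def isRotated_alt (s1 : String) (s2 : String) : Bool :=
  let cs := s1.toList
  let right := PySem.List.slice cs (some (-2)) none ++ PySem.List.slice cs none (some (-2))
  let left := PySem.List.slice cs (some 2) none ++ PySem.List.slice cs none (some 2)
  decide (s2.toList = right) || decide (s2.toList = left)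

-- ===== PRECONDITION & SPEC =====
def Spec_isRotated (s1 : String) (s2 : String) (out : Bool) : Prop := out = isRotated_alt s1 s2
instance (s1 : String) (s2 : String) (out : Bool) : Decidable (Spec_isRotated s1 s2 out) := by unfold Spec_isRotated; infer_instance

-- ===== CLAIM (what is proved, stated in full; the proofs are below) =====
def Claim_equal_isRotated : Prop := ∀ (s1 : String) (s2 : String), Dom_isRotated s1 s2 → Spec_isRotated s1 s2 (isRotated s1 s2)

-- ===== LEMMAS AND PROOFS =====

theorem pv_foldl_set_length (p : Nat → Nat) (v : Nat → Char) :
    ∀ (is : List Nat) (a : List Char),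
      (is.foldl (fun acc i => acc.set (p i) (v i)) a).length = a.length := by
  intro is
  induction is with
  | nil => intro a; rfl
  | cons i is ih => intro a; simpa [List.foldl_cons] using ih (a.set (p i) (v i))

-- get? of a fold of writes: q is a one-sided inverse of the write position p on the indices used.
theorem pv_foldl_set_getElem? (p q : Nat → Nat) (v : Nat → Char) :
    ∀ (is : List Nat) (a : List Char),
      (∀ i ∈ is, p i < a.length ∧ q (p i) = i) →
      ∀ k, k < a.length →
        (is.foldl (fun acc i => acc.set (p i) (v i)) a)[k]? =
          if q k ∈ is ∧ p (q k) = k then some (v (q k)) else a[k]? := by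
  intro is
  induction is with
  | nil => intro a _ k hk; simp
  | cons i is ih =>
    intro a hp k hk
    have hpi := hp i (by simp)
    have hlen : (a.set (p i) (v i)).length = a.length := by simp
    have hrec := ih (a.set (p i) (v i))
      (by intro j hj; rw [hlen]; exact hp j (by simp [hj])) k (by omega)
    rw [List.foldl_cons, hrec]
    by_cases h1 : q k ∈ is ∧ p (q k) = k
    · simp [h1, List.mem_cons.2 (Or.inr h1.1)]
    · rw [if_neg h1]
      by_cases h2 : q k = i ∧ p (q k) = k
      · have hpk : p i = k := by rw [← h2.1, h2.2]
        simp [List.mem_cons, h2, hpk, List.getElem?_set_self hk]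
      · have hne : k ≠ p i := by
          intro he
          exact h2 ⟨by rw [he, hpi.2], by rw [he, hpi.2]⟩
        have hnotc : ¬ (q k ∈ i :: is ∧ p (q k) = k) := by
          intro hc
          rcases List.mem_cons.1 hc.1 with h | h
          · exact h2 ⟨h, hc.2⟩
          · exact h1 ⟨h, hc.2⟩
        rw [if_neg hnotc, List.getElem?_set_ne (by omega)]

theorem pv_emod_add_left (x y n : Int) : (x % n + y) % n = (x + y) % n := by
  rw [Int.add_emod (x % n) y, Int.emod_emod_of_dvd x (dvd_refl n), ← Int.add_emod]

theorem pv_emod_self (x n : Int) (h0 : 0 ≤ x) (hx : x < n) : x % n = x :=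
  Int.emod_eq_of_lt h0 hx

-- x + n ≡ x (mod n): the shifted window of the rotation index
theorem pv_emod_shift (x n : Int) (hx1 : n ≤ x) (hx2 : x < 2 * n) :
    x % n = x - n := by
  have h : (x - n) % n = x % n := Int.sub_emod_right x n
  rw [← h, pv_emod_self _ _ (by omega) (by omega)]

-- the common shape of both of A's loops, evaluated in closed form:
-- writing cs[i] to position (i + off) % n for i in range(n) yields drop m ++ take m,
-- provided (k + (n - off)) % n is the rotation inverse described by m.
theorem pv_loop_eq (cs : List Char) (off : Int) (m : Nat)
    (hm : m ≤ cs.length)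
    (hoff : ∀ k : Nat, k < cs.length →
      (((k : Int) + ((cs.length : Int) - off)) % (cs.length : Int)).toNat =
        (if k < cs.length - m then k + m else k - (cs.length - m))) :
    (List.range cs.length).foldl
      (fun acc i =>
        acc.set ((((i : Int) + off) % (cs.length : Int)).toNat) (cs.getD i 'a'))
      (List.replicate cs.length 'a') = cs.drop m ++ cs.take m := by
  rcases Nat.eq_zero_or_pos cs.length with h0 | hpos
  · rw [List.eq_nil_of_length_eq_zero h0]; simp
  have hnpos : (0 : Int) < (cs.length : Int) := by exact_mod_cast hpos
  have hqlt : ∀ k : Nat, k < cs.length →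
      (((k : Int) + ((cs.length : Int) - off)) % (cs.length : Int)).toNat < cs.length := by
    intro k hk
    have h1 := Int.emod_lt_of_pos ((k : Int) + ((cs.length : Int) - off)) hnpos
    have h2 := Int.emod_nonneg ((k : Int) + ((cs.length : Int) - off)) hnpos.ne'
    omega
  have hplt : ∀ i : Nat, (((i : Int) + off) % (cs.length : Int)).toNat < cs.length := by
    intro i
    have h1 := Int.emod_lt_of_pos ((i : Int) + off) hnpos
    have h2 := Int.emod_nonneg ((i : Int) + off) hnpos.ne'
    omega
  have hqp : ∀ i : Nat, i < cs.length →
      ((((((i : Int) + off) % (cs.length : Int)).toNat : Int) + ((cs.length : Int) - off))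
          % (cs.length : Int)).toNat = i := by
    intro i hi
    rw [Int.toNat_of_nonneg (Int.emod_nonneg _ hnpos.ne'), pv_emod_add_left]
    have he : (i : Int) + off + ((cs.length : Int) - off) = (i : Int) + (cs.length : Int) := by ring
    rw [he, Int.add_emod_right, pv_emod_self _ _ (by omega) (by exact_mod_cast hi)]
    omega
  have hpq : ∀ k : Nat, k < cs.length →
      ((((((k : Int) + ((cs.length : Int) - off)) % (cs.length : Int)).toNat : Int) + off)
          % (cs.length : Int)).toNat = k := by
    intro k hk
    rw [Int.toNat_of_nonneg (Int.emod_nonneg _ hnpos.ne'), pv_emod_add_left]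
    have he : (k : Int) + ((cs.length : Int) - off) + off = (k : Int) + (cs.length : Int) := by ring
    rw [he, Int.add_emod_right, pv_emod_self _ _ (by omega) (by exact_mod_cast hk)]
    omega
  have hlenL : ((List.range cs.length).foldl
      (fun acc i =>
        acc.set ((((i : Int) + off) % (cs.length : Int)).toNat) (cs.getD i 'a'))
      (List.replicate cs.length 'a')).length = cs.length := by
    rw [pv_foldl_set_length]; simp
  apply List.ext_getElem?
  intro k
  by_cases hk : k < cs.length
  · have hget := pv_foldl_set_getElem?
      (fun i => (((i : Int) + off) % (cs.length : Int)).toNat)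
      (fun k => (((k : Int) + ((cs.length : Int) - off)) % (cs.length : Int)).toNat)
      (fun i => cs.getD i 'a') (List.range cs.length) (List.replicate cs.length 'a')
      (by intro i hi
          refine ⟨by simpa using hplt i, hqp i (by simpa using hi)⟩)
      k (by simpa using hk)
    rw [hget, if_pos ⟨List.mem_range.2 (hqlt k hk), hpq k hk⟩]
    have hq := hoff k hk
    have hqval : cs.getD ((((k : Int) + ((cs.length : Int) - off)) % (cs.length : Int)).toNat) 'a'
        = cs[(((k : Int) + ((cs.length : Int) - off)) % (cs.length : Int)).toNat]'(hqlt k hk) :=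
      List.getD_eq_getElem cs 'a' _
    simp only [hqval]
    by_cases hcase : k < cs.length - m
    · rw [List.getElem?_append_left (by simp; omega)]
      rw [List.getElem?_drop, List.getElem?_eq_getElem (by omega)]
      rw [if_pos hcase] at hq
      simp only [Option.some.injEq]
      congr 1
      omega
    · rw [List.getElem?_append_right (by simp; omega)]
      rw [List.getElem?_take_of_lt (by simp; omega), List.getElem?_eq_getElem (by omega)]
      rw [if_neg hcase] at hq
      simp only [Option.some.injEq]
      congr 1
      simp only [List.length_drop]
      omega
  · rw [List.getElem?_eq_none (by rw [hlenL]; omega),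
      List.getElem?_eq_none (by simp; omega)]

-- bridge: A's literal loop (pyRange / Int.mod / pySetD / pyGetD) is the set/getD fold above
theorem pv_loopA_eq (cs : List Char) (off : Int) :
    (PySem.List.pyRange 0 (cs.length : Int) 1).foldl
      (fun acc i =>
        PySem.List.pySetD acc (PySem.Int.mod (i + off) (cs.length : Int)) (PySem.List.pyGetD cs i 'a'))
      (List.replicate cs.length 'a')
    = (List.range cs.length).foldl
      (fun acc i =>
        acc.set ((((i : Int) + off) % (cs.length : Int)).toNat) (cs.getD i 'a'))
      (List.replicate cs.length 'a') := by
  rcases Nat.eq_zero_or_pos cs.length with h0 | hpos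
  · simp [h0]
  have hnpos : (0 : Int) < (cs.length : Int) := by exact_mod_cast hpos
  rw [PySem.List.pyRange_zero_nat, List.foldl_map]
  apply PySem.List.foldl_congr_mem
  intro acc i _
  rw [PySem.Int.mod_eq_emod_of_pos hnpos,
    PySem.List.pySetD_of_nonneg _ _ (Int.emod_nonneg _ hnpos.ne'),
    PySem.List.pyGetD_natCast]

theorem pv_loopA_left (cs : List Char) :
    (PySem.List.pyRange 0 (cs.length : Int) 1).foldl
      (fun acc j =>
        PySem.List.pySetD acc (PySem.Int.mod (j - 2 + (cs.length : Int)) (cs.length : Int)) (PySem.List.pyGetD cs j 'a'))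
      (List.replicate cs.length 'a')
    = (List.range cs.length).foldl
      (fun acc i =>
        acc.set ((((i : Int) + ((cs.length : Int) - 2)) % (cs.length : Int)).toNat) (cs.getD i 'a'))
      (List.replicate cs.length 'a') := by
  have h : (fun (acc : List Char) (j : Int) =>
        PySem.List.pySetD acc (PySem.Int.mod (j - 2 + (cs.length : Int)) (cs.length : Int)) (PySem.List.pyGetD cs j 'a'))
      = fun acc j =>
        PySem.List.pySetD acc (PySem.Int.mod (j + ((cs.length : Int) - 2)) (cs.length : Int)) (PySem.List.pyGetD cs j 'a') := by
    funext acc j; congr 2; ring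
  rw [h, pv_loopA_eq cs ((cs.length : Int) - 2)]

-- index arithmetic for the right rotation (off = 2, m = n - 2)
theorem pv_off_right (cs : List Char) :
    ∀ k : Nat, k < cs.length →
      (((k : Int) + ((cs.length : Int) - 2)) % (cs.length : Int)).toNat =
        (if k < cs.length - (cs.length - 2) then k + (cs.length - 2)
         else k - (cs.length - (cs.length - 2))) := by
  intro k hk
  have hnpos : (0 : Int) < (cs.length : Int) := by omega
  by_cases h2 : 2 ≤ cs.length
  · by_cases hc : k < cs.length - (cs.length - 2)
    · rw [pv_emod_self _ _ (by omega) (by omega), if_pos hc]; omega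
    · rw [pv_emod_shift _ _ (by omega) (by omega), if_neg hc]; omega
  · -- cs.length = 1, k = 0: (0 + (1 - 2)) % 1 = 0
    have h1 : cs.length = 1 := by omega
    have h0 : k = 0 := by omega
    rw [h1, h0]; decide

-- index arithmetic for the left rotation (off = n - 2, m = 2) on strings of length ≥ 2
theorem pv_off_left (cs : List Char) (h2 : 2 ≤ cs.length) :
    ∀ k : Nat, k < cs.length →
      (((k : Int) + ((cs.length : Int) - ((cs.length : Int) - 2))) % (cs.length : Int)).toNat =
        (if k < cs.length - 2 then k + 2 else k - (cs.length - 2)) := by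
  intro k hk
  have hnpos : (0 : Int) < (cs.length : Int) := by omega
  have hs : (cs.length : Int) - ((cs.length : Int) - 2) = 2 := by ring
  rw [hs]
  by_cases hc : k < cs.length - 2
  · rw [pv_emod_self _ _ (by omega) (by omega), if_pos hc]; omega
  · rw [pv_emod_shift _ _ (by omega) (by omega), if_neg hc]; omega

-- slices of B in drop/take form
theorem pv_slices (cs : List Char) :
    PySem.List.slice cs (some (-2)) none ++ PySem.List.slice cs none (some (-2))
      = cs.drop (cs.length - 2) ++ cs.take (cs.length - 2) ∧
    PySem.List.slice cs (some 2) none ++ PySem.List.slice cs none (some 2)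
      = cs.drop 2 ++ cs.take 2 := by
  constructor
  · rw [PySem.List.slice_from_neg_ofNat cs 2 (by omega),
      PySem.List.slice_to_neg_ofNat cs 2 (by omega)]
  · rw [show ((2 : Int)) = ((2 : Nat) : Int) by rfl,
      PySem.List.slice_from_natCast, PySem.List.slice_to_natCast]

theorem isRotated_eq_alt (s1 s2 : String) : isRotated s1 s2 = isRotated_alt s1 s2 := by
  simp only [isRotated, isRotated_alt]
  rw [pv_loopA_eq s1.toList 2, pv_loopA_left s1.toList,
    (pv_slices s1.toList).1, (pv_slices s1.toList).2,
    pv_loop_eq s1.toList 2 (s1.toList.length - 2) (by omega) (pv_off_right s1.toList)]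
  by_cases h2 : 2 ≤ s1.toList.length
  · rw [pv_loop_eq s1.toList ((s1.toList.length : Int) - 2) 2 (by omega) (pv_off_left s1.toList h2)]
    by_cases hr : s2.toList = s1.toList.drop (s1.toList.length - 2) ++ s1.toList.take (s1.toList.length - 2) <;>
      by_cases hl : s2.toList = s1.toList.drop 2 ++ s1.toList.take 2 <;>
      simp [hr, hl]
  · -- length ≤ 1: the left loop also yields drop 2 ++ take 2 (both are cs itself)
    have hleft : (List.range s1.toList.length).foldl
        (fun acc i =>
          acc.set ((((i : Int) + ((s1.toList.length : Int) - 2)) % (s1.toList.length : Int)).toNat)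
            (s1.toList.getD i 'a'))
        (List.replicate s1.toList.length 'a') = s1.toList.drop 2 ++ s1.toList.take 2 := by
      rcases Nat.eq_zero_or_pos s1.toList.length with h | h
      · rw [List.eq_nil_of_length_eq_zero h]; simp
      · obtain ⟨c, hc⟩ : ∃ c, s1.toList = [c] := List.length_eq_one_iff.1 (by omega)
        rw [hc]; simp [List.range_succ]
    rw [hleft]
    by_cases hr : s2.toList = s1.toList.drop (s1.toList.length - 2) ++ s1.toList.take (s1.toList.length - 2) <;>
      by_cases hl : s2.toList = s1.toList.drop 2 ++ s1.toList.take 2 <;>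
      simp [hr, hl]

-- ===== VERDICT (by name: the statement is the Claim_ definition above) =====
theorem isRotated_spec : Claim_equal_isRotated := by
  intro s1 s2 _
  unfold Spec_isRotated
  exact isRotated_eq_alt s1 s2
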